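-- pv_equiv track=rewrite | github.com/thecodearrow/100-Days-Of-Code | Revised Russian Roulette.py | revisedRussianRoulette
-- ===== SOURCE A (Python) =====
-- def revisedRussianRoulette(doors):
--     # Complete this function
--     minCount=0
--     maxCount=0
--     for i in range(len(doors)):
--         if(doors[i]==1):
--             maxCount=maxCount+1
--     for i in range(len(doors)):
--         if(doors[i]==1):
--             doors[i]=0
--             minCount=minCount+1
--             if(not i+1==len(doors) and doors[i+1]==1):
--                 doors[i+1]=0
--
--     return(str(minCount)+" "+str(maxCount))
-- ===== SOURCE B (Python) =====
-- def revisedRussianRoulette(doors):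
--     # One pass over maximal runs of consecutive 1s: a run of length L needs
--     # ceil(L/2) shots minimally and L shots maximally.
--     # Return-value reimplementation: unlike A, it does not mutate doors.
--     minCount = 0
--     maxCount = 0
--     run = 0
--     for d in doors:
--         if d == 1:
--             run += 1
--             maxCount += 1
--         else:
--             minCount += (run + 1) // 2
--             run = 0
--     minCount += (run + 1) // 2
--     return str(minCount) + " " + str(maxCount)
-- ===== Notes on version B (the rewrite author's own statement) =====
-- stated objective: simpler
-- what changed: Replaces A's two index loops with in-place zeroing and i+1 lookahead by a single mutation-free pass that tracks the current run of consecutive 1s and adds ceil(run/2) per run; B does not mutate doors (return value is identical).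
import Mathlib
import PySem

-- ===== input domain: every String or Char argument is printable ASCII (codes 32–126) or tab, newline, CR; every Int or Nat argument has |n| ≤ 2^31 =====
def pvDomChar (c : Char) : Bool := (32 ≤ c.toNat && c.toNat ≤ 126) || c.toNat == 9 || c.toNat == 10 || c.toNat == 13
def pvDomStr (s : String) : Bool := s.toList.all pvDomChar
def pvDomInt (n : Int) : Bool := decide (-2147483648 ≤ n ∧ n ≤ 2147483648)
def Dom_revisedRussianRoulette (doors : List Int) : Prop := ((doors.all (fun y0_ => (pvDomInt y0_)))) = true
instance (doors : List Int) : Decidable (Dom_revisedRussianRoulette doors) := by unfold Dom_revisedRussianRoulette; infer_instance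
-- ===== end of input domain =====

-- B replaces A's two index loops (in-place zeroing with i+1 lookahead) by one
-- mutation-free pass over runs of consecutive 1s (objective: simpler).
-- Equivalence is about the RETURN value only: A zeroes every 1 in doors, B does not mutate.

-- ===== PORT A =====
-- step of A's second loop: state = (doors, minCount), i the current index
def stepA (st : List Int × Int) (i : Int) : List Int × Int :=
  if PySem.List.pyGetD st.1 i 0 = 1 then
    if ¬ (i + 1 = (((st.1.set i.toNat 0).length : Nat) : Int)) ∧
        PySem.List.pyGetD (st.1.set i.toNat 0) (i + 1) 0 = 1 then
      ((st.1.set i.toNat 0).set (i + 1).toNat 0, st.2 + 1)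
    else (st.1.set i.toNat 0, st.2 + 1)
  else st

def revisedRussianRoulette (doors : List Int) : String :=
  let maxCount : Int := (PySem.List.pyRange 0 (doors.length : Int) 1).foldl
    (fun m i => if PySem.List.pyGetD doors i 0 = 1 then m + 1 else m) 0
  let st := (PySem.List.pyRange 0 (doors.length : Int) 1).foldl stepA (doors, 0)
  PySem.Int.toStr st.2 ++ " " ++ PySem.Int.toStr maxCount

-- ===== PORT B =====
-- step of B's single pass: state = (minCount, run, maxCount)
def stepB (st : Int × Int × Int) (d : Int) : Int × Int × Int :=
  if d = 1 then (st.1, st.2.1 + 1, st.2.2 + 1)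
  else (st.1 + PySem.Int.floordiv (st.2.1 + 1) 2, 0, st.2.2)

def revisedRussianRoulette_alt (doors : List Int) : String :=
  let st := doors.foldl stepB (0, 0, 0)
  PySem.Int.toStr (st.1 + PySem.Int.floordiv (st.2.1 + 1) 2) ++ " " ++ PySem.Int.toStr st.2.2

-- ===== PRECONDITION & SPEC =====
def Spec_revisedRussianRoulette (doors : List Int) (out : String) : Prop := out = revisedRussianRoulette_alt doors
instance (doors : List Int) (out : String) : Decidable (Spec_revisedRussianRoulette doors out) := by unfold Spec_revisedRussianRoulette; infer_instance

-- ===== CLAIM (what is proved, stated in full; the proofs are below) =====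
def Claim_equal_revisedRussianRoulette : Prop := ∀ (doors : List Int), Dom_revisedRussianRoulette doors → Spec_revisedRussianRoulette doors (revisedRussianRoulette doors)

-- ===== LEMMAS AND PROOFS =====

-- number of ones in the list
def ones : List Int → Int
  | [] => 0
  | d :: t => (if d = 1 then 1 else 0) + ones t

-- minCount as computed by A's greedy second loop, recursively
def g : List Int → Int
  | [] => 0
  | [d] => if d = 1 then 1 else 0
  | d :: e :: t => if d = 1 then (if e = 1 then 1 + g t else 1 + g (e :: t)) else g (e :: t)

-- minCount as computed by B's run scan, with pending run length
def h : Int → List Int → Int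
  | run, [] => PySem.Int.floordiv (run + 1) 2
  | run, d :: t => if d = 1 then h (run + 1) t else PySem.Int.floordiv (run + 1) 2 + h 0 t

-- zero out the ones (A's net mutation of doors)
def zero (l : List Int) : List Int := l.map (fun d => if d = 1 then 0 else d)

theorem g_cons_ne (d : Int) (t : List Int) (hd : d ≠ 1) : g (d :: t) = g t := by
  cases t <;> simp [g, hd]

theorem set_append_cons (pre t : List Int) (d v : Int) :
    (pre ++ d :: t).set pre.length v = pre ++ v :: t := by
  induction pre with
  | nil => simp
  | cons p ps ih => simp [ih]

theorem getD_append_cons (pre t : List Int) (d x : Int) :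
    (pre ++ d :: t).getD pre.length x = d := by
  simp

theorem h_shift (t : List Int) : ∀ (run : Int), 0 ≤ run → h (run + 2) t = 1 + h run t := by
  induction t with
  | nil =>
    intro run hr
    simp only [h]
    rw [PySem.Int.floordiv_eq_ediv_of_pos (by omega), PySem.Int.floordiv_eq_ediv_of_pos (by omega)]
    omega
  | cons d t ih =>
    intro run hr
    by_cases hd : d = 1
    · subst hd
      simp only [h, if_true]
      have e : run + 2 + 1 = run + 1 + 2 := by ring
      rw [e, ih (run + 1) (by omega)]
    · simp only [h, if_neg hd]
      rw [PySem.Int.floordiv_eq_ediv_of_pos (by omega), PySem.Int.floordiv_eq_ediv_of_pos (by omega)]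
      omega

theorem g_eq_h (l : List Int) : g l = h 0 l := by
  match l with
  | [] => simp [g, h]
  | [d] =>
    by_cases hd : d = 1 <;>
      simp [g, h, hd]
  | d :: e :: t =>
    by_cases hd : d = 1
    · by_cases he : e = 1
      · subst hd; subst he
        have ht := g_eq_h t
        have hs := h_shift t 0 (by omega)
        norm_num at hs
        simp [g, h, ht, hs]
      · subst hd
        have ht := g_eq_h (e :: t)
        simp only [h, if_neg he] at ht
        simp [g, h, he, ht]
    · have ht := g_eq_h (e :: t)
      rw [g_cons_ne d (e :: t) hd, ht]
      simp [h, hd]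
termination_by l.length

-- B's fold computes (h, ones) relative to any starting accumulator
theorem foldB_char (l : List Int) : ∀ (m r x : Int),
    (l.foldl stepB (m, r, x)).1 + PySem.Int.floordiv ((l.foldl stepB (m, r, x)).2.1 + 1) 2
      = m + h r l
    ∧ (l.foldl stepB (m, r, x)).2.2 = x + ones l := by
  induction l with
  | nil => intro m r x; simp [h, ones]
  | cons d t ih =>
    intro m r x
    by_cases hd : d = 1
    · simpa [stepB, hd, h, ones, add_comm, add_left_comm] using ih m (r + 1) (x + 1)
    · have := ih (m + PySem.Int.floordiv (r + 1) 2) 0 x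
      simp only [List.foldl, stepB, h, ones, hd, if_false] at this ⊢
      constructor
      · rw [this.1]; ring
      · rw [this.2]; ring

-- A's second loop, run from index |pre| on pre ++ rest, consumes rest greedily:
-- it zeroes the ones of rest and adds g rest to minCount.
theorem aloop (rest : List Int) : ∀ (pre : List Int) (mc : Int),
    (PySem.List.pyRange (pre.length : Int) ((pre.length : Int) + (rest.length : Int)) 1).foldl
        stepA (pre ++ rest, mc)
      = (pre ++ zero rest, mc + g rest) := by
  match rest with
  | [] =>
    intro pre mc
    rw [PySem.List.pyRange_one_eq_nil (by simp)]
    simp [zero, g]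
  | d :: t =>
    intro pre mc
    rw [PySem.List.pyRange_one_cons (by simp), List.foldl_cons]
    by_cases hd : d = 1
    · subst hd
      have hget : PySem.List.pyGetD (pre ++ 1 :: t) (pre.length : Int) 0 = 1 := by
        rw [PySem.List.pyGetD_natCast, getD_append_cons]
      have hset : (pre ++ 1 :: t).set ((pre.length : Int)).toNat 0 = pre ++ 0 :: t := by
        rw [Int.toNat_natCast, set_append_cons]
      match t with
      | [] =>
        -- last door: no lookahead
        have hstep : stepA (pre ++ [(1:Int)], mc) (pre.length : Int) = (pre ++ [0], mc + 1) := by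
          simp only [stepA, hget, hset, if_true]
          rw [if_neg (by simp)]
        rw [hstep, PySem.List.pyRange_one_eq_nil (by simp)]
        simp [zero, g]
      | e :: t' =>
        have hget2 : PySem.List.pyGetD (pre ++ 0 :: e :: t') ((pre.length : Int) + 1) 0 = e := by
          have h1 : ((pre.length : Int) + 1) = (((pre ++ [(0:Int)]).length : Nat) : Int) := by
            simp
          have h2 : pre ++ 0 :: e :: t' = (pre ++ [(0:Int)]) ++ e :: t' := by simp
          rw [h1, h2, PySem.List.pyGetD_natCast, getD_append_cons]
        by_cases he : e = 1
        · -- neighbour is 1: zero it too, and the next iteration skips it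
          subst he
          have hstep : stepA (pre ++ 1 :: 1 :: t', mc) (pre.length : Int)
              = (pre ++ 0 :: 0 :: t', mc + 1) := by
            simp only [stepA, hget, hset, if_true]
            rw [if_pos ⟨by simp; omega, hget2⟩]
            have h1 : ((pre.length : Int) + 1).toNat = (pre ++ [(0:Int)]).length := by
              simp
            have h2 : pre ++ 0 :: 1 :: t' = (pre ++ [(0:Int)]) ++ 1 :: t' := by simp
            rw [h1, h2, set_append_cons]; simp
          rw [hstep]
          -- peel the next index: it reads the freshly-zeroed neighbour and skips
          rw [PySem.List.pyRange_one_cons (by simp), List.foldl_cons]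
          have hget3 : PySem.List.pyGetD (pre ++ 0 :: 0 :: t') ((pre.length : Int) + 1) 0 = 0 := by
            have h1 : ((pre.length : Int) + 1) = (((pre ++ [(0:Int)]).length : Nat) : Int) := by
              simp
            have h2 : pre ++ 0 :: 0 :: t' = (pre ++ [(0:Int)]) ++ 0 :: t' := by simp
            rw [h1, h2, PySem.List.pyGetD_natCast, getD_append_cons]
          have hstep2 : stepA (pre ++ 0 :: 0 :: t', mc + 1) ((pre.length : Int) + 1)
              = (pre ++ 0 :: 0 :: t', mc + 1) := by
            simp only [stepA, hget3]
            rw [if_neg (by norm_num)]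
          rw [hstep2]
          have hpre2 : pre ++ 0 :: 0 :: t' = (pre ++ [(0:Int), 0]) ++ t' := by simp
          have hidx : (pre.length : Int) + 1 + 1 = (((pre ++ [(0:Int), 0]).length : Nat) : Int) := by
            simp; omega
          have hend : (pre.length : Int) + ((1 :: 1 :: t').length : Int)
              = (((pre ++ [(0:Int), 0]).length : Nat) : Int) + (t'.length : Int) := by
            simp; omega
          rw [hpre2, hidx, hend, aloop t' (pre ++ [0, 0]) (mc + 1)]
          simp [zero, g, add_assoc]
        · -- neighbour not 1: just continue at it
          have hstep : stepA (pre ++ 1 :: e :: t', mc) (pre.length : Int)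
              = (pre ++ 0 :: e :: t', mc + 1) := by
            simp only [stepA, hget, hset, if_true]
            rw [if_neg (by rw [hget2]; tauto)]
          rw [hstep]
          have hpre1 : pre ++ 0 :: e :: t' = (pre ++ [(0:Int)]) ++ e :: t' := by simp
          have hidx : (pre.length : Int) + 1 = (((pre ++ [(0:Int)]).length : Nat) : Int) := by simp
          have hend : (pre.length : Int) + ((1 :: e :: t').length : Int)
              = (((pre ++ [(0:Int)]).length : Nat) : Int) + ((e :: t').length : Int) := by
            simp; omega
          rw [hpre1, hidx, hend, aloop (e :: t') (pre ++ [0]) (mc + 1)]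
          simp [zero, g, he, add_assoc]
    · -- doors[i] != 1: nothing happens
      have hget : PySem.List.pyGetD (pre ++ d :: t) (pre.length : Int) 0 = d := by
        rw [PySem.List.pyGetD_natCast, getD_append_cons]
      have hstep : stepA (pre ++ d :: t, mc) (pre.length : Int) = (pre ++ d :: t, mc) := by
        simp only [stepA, hget]
        rw [if_neg hd]
      rw [hstep]
      have hpre1 : pre ++ d :: t = (pre ++ [d]) ++ t := by simp
      have hidx : (pre.length : Int) + 1 = (((pre ++ [d]).length : Nat) : Int) := by simp
      have hend : (pre.length : Int) + ((d :: t).length : Int)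
          = (((pre ++ [d]).length : Nat) : Int) + (t.length : Int) := by simp; omega
      rw [hpre1, hidx, hend, aloop t (pre ++ [d]) mc]
      simp [zero, g_cons_ne d t hd, hd]
termination_by rest.length
decreasing_by all_goals simp

-- A's first loop counts the ones
theorem ones_foldl (l : List Int) : ∀ (m : Int),
    l.foldl (fun m v => if v = 1 then m + 1 else m) m = m + ones l := by
  induction l with
  | nil => intro m; simp [ones]
  | cons d t ih =>
    intro m
    by_cases hd : d = 1 <;> simp [ones, hd, ih, add_comm, add_left_comm]

theorem a_max (doors : List Int) :
    (PySem.List.pyRange 0 (doors.length : Int) 1).foldl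
        (fun m i => if PySem.List.pyGetD doors i 0 = 1 then m + 1 else m) 0 = ones doors := by
  have := PySem.List.foldl_pyRange_pyGetD' (xs := doors)
    (f := fun m v => if v = 1 then m + 1 else m) (d := 0) (init := (0 : Int)) (a := 0) (by omega)
  simpa [ones_foldl] using this

-- ===== VERDICT (by name: the statement is the Claim_ definition above) =====
theorem revisedRussianRoulette_spec : Claim_equal_revisedRussianRoulette := by
  intro doors _
  unfold Spec_revisedRussianRoulette revisedRussianRoulette revisedRussianRoulette_alt
  have hA : (PySem.List.pyRange 0 (doors.length : Int) 1).foldl stepA (doors, 0)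
      = (zero doors, 0 + g doors) := by
    have := aloop doors [] 0
    simpa using this
  have hB := foldB_char doors 0 0 0
  rw [hA, a_max doors]
  have h1 : (doors.foldl stepB (0, 0, 0)).1
      + PySem.Int.floordiv ((doors.foldl stepB (0, 0, 0)).2.1 + 1) 2 = g doors := by
    rw [g_eq_h]; simpa using hB.1
  have h2 : (doors.foldl stepB (0, 0, 0)).2.2 = ones doors := by simpa using hB.2
  simp only [h1, h2]
  norm_num
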